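-- pv_equiv track=rewrite | github.com/Junoflows/CodingTest | 프로그래머스/unrated/138477. 명예의 전당 （1）/명예의 전당 （1）.py | solution
-- ===== SOURCE A (Python) =====
-- def solution(k, score):
--     answer = []
--     for i in range(len(score)):
--         li = sorted(score[:i+1])
--         if len(li) <= k:
--             answer.append(li[0])
--         else:
--             answer.append(li[-k])
--     return answer
-- ===== SOURCE B (Python) =====
-- def solution(k, score):
--     # One pass: keep a sorted buffer of the current top-k scores; its first
--     # element is the answer for each prefix.
--     answer = []
--     hall = []  # ascending list of the (at most k) best scores so far
--     for s in score:
--         j = 0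
--         while j < len(hall) and hall[j] <= s:
--             j += 1
--         hall.insert(j, s)
--         if len(hall) > k:
--             hall.pop(0)
--         answer.append(hall[0])
--     return answer
-- ===== Notes on version B (the rewrite author's own statement) =====
-- stated objective: faster
-- what changed: Instead of sorting every prefix from scratch (n sorts of growing prefixes), B makes one pass maintaining a sorted buffer of only the current top-k scores (insert, drop the smallest when it exceeds k) and emits the buffer's minimum each step.
-- outside the precondition, e.g. on solution(0, [5, 3]): A returns [5, 3], B raises IndexError; on solution(-1, []): A returns [], B returns []
import Mathlib
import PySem

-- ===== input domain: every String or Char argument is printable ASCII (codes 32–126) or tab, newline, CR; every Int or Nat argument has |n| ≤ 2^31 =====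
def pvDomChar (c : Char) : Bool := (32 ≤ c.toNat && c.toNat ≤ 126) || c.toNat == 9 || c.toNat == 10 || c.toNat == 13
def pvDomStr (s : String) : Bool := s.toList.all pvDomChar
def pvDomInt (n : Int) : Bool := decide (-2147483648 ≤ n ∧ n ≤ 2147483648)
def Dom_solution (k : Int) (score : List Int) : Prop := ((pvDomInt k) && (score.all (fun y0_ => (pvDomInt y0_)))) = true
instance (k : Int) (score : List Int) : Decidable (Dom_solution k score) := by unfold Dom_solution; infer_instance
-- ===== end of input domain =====

-- B replaces per-prefix full sorts by one pass over the scores maintaining a sorted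
-- buffer of the current top-k only (objective: faster).


-- ===== PORT A =====
def solution (k : Int) (score : List Int) : List Int :=
  (PySem.List.pyRange 0 (score.length : Int) 1).foldl
    (fun answer i =>
      let li := PySem.List.sorted (PySem.List.slice score none (some (i + 1))) (fun x => x) false
      if (li.length : Int) ≤ k then
        answer ++ [PySem.List.pyGetD li 0 0]
      else
        answer ++ [PySem.List.pyGetD li (-k) 0])
    []

-- ===== PORT B =====
-- the while-loop + insert of Source B: insert s after every element ≤ s
def insertAsc (s : Int) : List Int → List Int
  | [] => [s]
  | x :: xs => if x ≤ s then x :: insertAsc s xs else s :: x :: xs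

def solution_alt (k : Int) (score : List Int) : List Int :=
  (score.foldl
    (fun (st : List Int × List Int) s =>
      let hall := insertAsc s st.2
      let hall2 := if k < (hall.length : Int) then hall.tail else hall
      (st.1 ++ [hall2.headD 0], hall2))
    ([], [])).1

-- ===== PRECONDITION & SPEC =====
-- Pre_ restricts to the problem's natural domain k ≥ 1: for k ≤ 0 A never takes its
-- min branch — it raises IndexError on any nonempty score for k < 0 and returns the
-- running minimum for k = 0 by accident of li[-0] = li[0]; B's top-k buffer is empty
-- there and indexing it raises.
def Pre_solution (k : Int) (score : List Int) : Prop := 1 ≤ k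
instance (k : Int) (score : List Int) : Decidable (Pre_solution k score) := by unfold Pre_solution; infer_instance
def pvWitness_solution : Int × List Int := (2, [10, 100, 20, 150, 1, 100, 200])
def Spec_solution (k : Int) (score : List Int) (out : List Int) : Prop := out = solution_alt k score
instance (k : Int) (score : List Int) (out : List Int) : Decidable (Spec_solution k score out) := by unfold Spec_solution; infer_instance

-- ===== CLAIM (what is proved, stated in full; the proofs are below) =====
def Claim_equal_solution : Prop := ∀ (k : Int) (score : List Int), Dom_solution k score → Pre_solution k score → Spec_solution k score (solution k score)

-- ===== LEMMAS AND PROOFS =====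

-- sorted(prefix) with identity key, and the top-k suffix of it
def sortId (l : List Int) : List Int := PySem.List.sorted l (fun x => x) false
def topk (kn : Nat) (l : List Int) : List Int := (sortId l).drop (l.length - kn)

-- the value A appends at index i
def Aval (k : Int) (score : List Int) (i : Int) : Int :=
  let li := PySem.List.sorted (PySem.List.slice score none (some (i + 1))) (fun x => x) false
  if (li.length : Int) ≤ k then PySem.List.pyGetD li 0 0 else PySem.List.pyGetD li (-k) 0

lemma solution_eq_map (k : Int) (score : List Int) :
    solution k score = (PySem.List.pyRange 0 (score.length : Int) 1).map (Aval k score) := by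
  have h : solution k score
      = (PySem.List.pyRange 0 (score.length : Int) 1).foldl
          (fun answer i => answer ++ [Aval k score i]) [] := by
    unfold solution Aval
    congr 1
    funext answer i
    dsimp only
    split_ifs <;> rfl
  rw [h, PySem.List.foldl_append_singleton_eq_map]
  simp

lemma insertAsc_perm (s : Int) (l : List Int) : (insertAsc s l).Perm (s :: l) := by
  induction l with
  | nil => simp [insertAsc]
  | cons x xs ih =>
    simp only [insertAsc]
    split
    · exact ((ih.cons x).trans (List.Perm.swap s x xs))
    · exact List.Perm.refl _

lemma length_insertAsc (s : Int) (l : List Int) : (insertAsc s l).length = l.length + 1 :=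
  (insertAsc_perm s l).length_eq

lemma insertAsc_of_lt (s : Int) (l : List Int) (h : ∀ y ∈ l, s < y) :
    insertAsc s l = s :: l := by
  cases l with
  | nil => rfl
  | cons x xs =>
    have : ¬ x ≤ s := by have := h x (by simp); omega
    simp [insertAsc, this]

lemma insertAsc_pairwise (s : Int) (l : List Int) (hl : l.Pairwise (· ≤ ·)) :
    (insertAsc s l).Pairwise (· ≤ ·) := by
  induction l with
  | nil => simp [insertAsc]
  | cons x xs ih =>
    rcases List.pairwise_cons.mp hl with ⟨hx, hxs⟩
    simp only [insertAsc]
    split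
    · rename_i hxle
      refine List.pairwise_cons.mpr ⟨?_, ih hxs⟩
      intro y hy
      have := (insertAsc_perm s xs).mem_iff.mp hy
      rcases List.mem_cons.mp this with rfl | h2
      · omega
      · exact hx y h2
    · rename_i hgt
      refine List.pairwise_cons.mpr ⟨?_, hl⟩
      intro y hy
      rcases List.mem_cons.mp hy with rfl | h2
      · omega
      · have := hx y h2; omega

lemma sortId_pairwise (l : List Int) : (sortId l).Pairwise (· ≤ ·) := by
  have := PySem.List.sorted_pairwise l (fun x => x)
  simpa [sortId] using this

lemma sortId_append (t : List Int) (s : Int) :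
    sortId (t ++ [s]) = insertAsc s (sortId t) := by
  apply PySem.List.sorted_id_eq_of_perm_of_pairwise
  · exact (insertAsc_perm s (sortId t)).trans
      (((PySem.List.sorted_perm t (fun x => x) false).cons s).trans (List.perm_append_singleton s t).symm)
  · exact insertAsc_pairwise s (sortId t) (sortId_pairwise t)

lemma length_sortId (l : List Int) : (sortId l).length = l.length := by
  simpa [sortId] using PySem.List.length_sorted l (fun x => x) false

lemma tail_insertAsc_drop (s : Int) (l : List Int) (m : Nat)
    (hl : l.Pairwise (· ≤ ·)) (hm : m ≤ l.length) :
    (insertAsc s (l.drop m)).tail = (insertAsc s l).drop (m + 1) := by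
  induction m generalizing l with
  | zero => simp [List.drop_one]
  | succ m ih =>
    cases l with
    | nil => simp at hm
    | cons x xs =>
      rcases List.pairwise_cons.mp hl with ⟨hx, hxs⟩
      simp only [List.drop_succ_cons, insertAsc]
      split
      · rename_i hxle
        rw [ih xs hxs (by simpa using hm)]
        simp
      · rename_i hgt
        have hall : ∀ y ∈ xs.drop m, s < y := by
          intro y hy
          have := hx y (List.mem_of_mem_drop hy); omega
        rw [insertAsc_of_lt s (xs.drop m) hall]
        simp

lemma topk_step (kn : Nat) (hk : 1 ≤ kn) (t : List Int) (s : Int) :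
    (if (kn : Int) < ((insertAsc s (topk kn t)).length : Int)
      then (insertAsc s (topk kn t)).tail else insertAsc s (topk kn t))
      = topk kn (t ++ [s]) := by
  have hL : (t ++ [s]).length = t.length + 1 := by simp
  unfold topk
  rw [sortId_append, hL]
  by_cases hsm : t.length < kn
  · have h0 : t.length - kn = 0 := by omega
    have h0' : t.length + 1 - kn = 0 := by omega
    have hcond : ¬ ((kn : Int) < ((insertAsc s ((sortId t).drop (t.length - kn))).length : Int)) := by
      rw [length_insertAsc]
      simp only [List.length_drop, length_sortId]
      push_cast
      omega
    rw [if_neg hcond, h0, h0', List.drop_zero, List.drop_zero]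
  · have hcond : (kn : Int) < ((insertAsc s ((sortId t).drop (t.length - kn))).length : Int) := by
      rw [length_insertAsc]
      simp only [List.length_drop, length_sortId]
      push_cast
      omega
    rw [if_pos hcond,
      tail_insertAsc_drop s (sortId t) (t.length - kn) (sortId_pairwise t) (by rw [length_sortId]; omega)]
    congr 1
    omega

lemma Aval_prefix (k : Int) (t : List Int) (s : Int) (i : Int)
    (h0 : 0 ≤ i) (hi : i < (t.length : Int)) :
    Aval k (t ++ [s]) i = Aval k t i := by
  unfold Aval
  have h1 : (0:Int) ≤ i + 1 := by omega
  rw [PySem.List.slice_to _ h1, PySem.List.slice_to _ h1]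
  rw [List.take_append_of_le_length (by omega)]

lemma headD_drop (l : List Int) (n : Nat) : (l.drop n).headD 0 = l.getD n 0 := by
  simp [List.headD_eq_head?, List.head?_drop, List.getD_eq_getElem?_getD]

lemma Aval_last (k : Int) (hk : 1 ≤ k) (t : List Int) (s : Int) :
    Aval k (t ++ [s]) (t.length : Int) = (topk k.toNat (t ++ [s])).headD 0 := by
  unfold Aval topk
  have h1 : (0:Int) ≤ (t.length : Int) + 1 := by omega
  rw [PySem.List.slice_to _ h1]
  have htake : ((t.length : Int) + 1).toNat = (t ++ [s]).length := by simp
  rw [htake, List.take_length]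
  set li := PySem.List.sorted (t ++ [s]) (fun x => x) false with hli
  have hlen : li.length = t.length + 1 := by simp [hli]
  have hlen' : (t ++ [s]).length = t.length + 1 := by simp
  rw [hlen']
  show (if (li.length : Int) ≤ k then PySem.List.pyGetD li 0 0 else PySem.List.pyGetD li (-k) 0)
      = (li.drop (t.length + 1 - k.toNat)).headD 0
  by_cases hle : (li.length : Int) ≤ k
  · have : t.length + 1 - k.toNat = 0 := by omega
    rw [if_pos hle, this, headD_drop]
    simp [PySem.List.pyGetD_zero]
  · rw [if_neg hle]
    push_neg at hle
    have hk1 : 0 < k.toNat := by omega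
    have hk2 : k.toNat ≤ li.length := by omega
    have hkc : -((k.toNat : Nat) : Int) = -k := by simp; omega
    rw [← hkc, PySem.List.pyGetD_neg_natCast li k.toNat 0 hk1 hk2, headD_drop]
    have hidx : li.length - k.toNat < li.length := by omega
    rw [List.getD_eq_getElem li 0 (by omega)]
    congr 1
    omega

lemma loopB_inv (k : Int) (hk : 1 ≤ k) (t : List Int) :
    t.foldl
      (fun (st : List Int × List Int) s =>
        let hall := insertAsc s st.2
        let hall2 := if k < (hall.length : Int) then hall.tail else hall
        (st.1 ++ [hall2.headD 0], hall2))
      ([], [])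
    = ((PySem.List.pyRange 0 (t.length : Int) 1).map (Aval k t), topk k.toNat t) := by
  induction t using List.reverseRecOn with
  | nil => simp [PySem.List.pyRange_one_eq_nil, topk, sortId, PySem.List.sorted]
  | append_singleton t s ih =>
    rw [List.foldl_append, ih]
    simp only [List.foldl_cons, List.foldl_nil]
    have hkn : ((k.toNat : Nat) : Int) = k := by omega
    have hstep : (if k < ((insertAsc s (topk k.toNat t)).length : Int)
        then (insertAsc s (topk k.toNat t)).tail else insertAsc s (topk k.toNat t))
        = topk k.toNat (t ++ [s]) := by
      rw [← hkn]
      exact topk_step k.toNat (by omega) t s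
    refine Prod.ext ?_ ?_
    · show (PySem.List.pyRange 0 (t.length : Int) 1).map (Aval k t)
          ++ [(if k < ((insertAsc s (topk k.toNat t)).length : Int)
                then (insertAsc s (topk k.toNat t)).tail else insertAsc s (topk k.toNat t)).headD 0]
          = (PySem.List.pyRange 0 (((t ++ [s]).length : Nat) : Int) 1).map (Aval k (t ++ [s]))
      rw [hstep]
      have hlen : (((t ++ [s]).length : Nat) : Int) = (t.length : Int) + 1 := by simp
      rw [hlen, PySem.List.pyRange_one_succ_right (by omega : (0:Int) ≤ (t.length : Int)), List.map_append]
      congr 1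
      · apply List.map_congr_left
        intro i hi
        have := (PySem.List.mem_pyRange_one).mp hi
        exact (Aval_prefix k t s i this.1 this.2).symm
      · simp only [List.map_cons, List.map_nil]
        rw [Aval_last k hk t s]
    · show (if k < ((insertAsc s (topk k.toNat t)).length : Int)
            then (insertAsc s (topk k.toNat t)).tail else insertAsc s (topk k.toNat t))
          = topk k.toNat (t ++ [s])
      exact hstep

-- ===== VERDICT (by name: the statement is the Claim_ definition above) =====
theorem solution_spec : Claim_equal_solution := by
  intro k score _ hpre
  unfold Spec_solution
  unfold solution_alt
  rw [loopB_inv k hpre score]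
  exact solution_eq_map k score
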